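-- pv_equiv track=rewrite | github.com/peterwestuw/BottleSum | utils/utils.py | get_sublists
-- ===== SOURCE A (Python) =====
-- from itertools import combinations
--
-- def get_sublists(original, min_len = None, max_len = None, only_consec = False):
--     '''
--     Given original list generate all (not necessarily consecutive)
--     sublists of length min_len to max_len, and return this list of lists
--     inputs:
--         original is a list representing the full original list
--         min_len is minimum sublist length
--         max_len is maximum sublist length
--     output:
--         sublists is a list of all sublists that fit the desired length constraints
--     '''
--
--     if min_len is None:
--         min_len = 1
--     if max_len is None:
--         max_len = len(original) - 1
--
--     sublists = []
--
--
--     if not only_consec: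
--         for l in range(min_len, max_len + 1):
--             sublists += list(combinations(original,l))
--     else: # only allow consecutive elimination
--         for l in range(min_len, max_len + 1):
--
--             skip = len(original) - l # how many words to skip in this iteration
--             for i in range(0,len(original)): # try deleting at every position
--                 if i + skip <= len(original): # only include this if we can delete 'skip' words at this i
--                     sublists += [original[0:i] + original[i+skip:]] # add on this sublist
--
--         pass
--
--     return sublists
-- ===== SOURCE B (Python) =====
-- def _subs(xs, lo, hi):
--     # all subsequences of xs with lo <= length <= hi, in index-lexicographic order,
--     # pruning branches that cannot reach length lo or would exceed hi
--     if lo > len(xs) or hi < 0 or hi < lo: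
--         return []
--     if not xs or hi == 0:
--         return [()] if lo <= 0 else []
--     head = [(xs[0],) + t for t in _subs(xs[1:], lo - 1, hi - 1)]
--     return head + _subs(xs[1:], lo, hi)
--
-- def get_sublists(original, min_len=None, max_len=None, only_consec=False):
--     if min_len is None:
--         min_len = 1
--     if max_len is None:
--         max_len = len(original) - 1
--     if only_consec:
--         n = len(original)
--         return [original[:i] + original[i + n - l:]
--                 for l in range(min_len, max_len + 1)
--                 for i in range(min(n, l + 1))]
--     pool = _subs(original, min_len, max_len)
--     return [t for l in range(min_len, max_len + 1) for t in pool if len(t) == l]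
-- ===== Notes on version B (the rewrite author's own statement) =====
-- stated objective: alternative
-- what changed: Replaces the per-length itertools.combinations loop with a single pruned recursive enumeration of all subsequences whose length lies in [min_len, max_len] (index-lexicographic order), sliced per length by a filter, and rewrites the consecutive branch's guarded nested loops as one flat comprehension over the truncated inner range.
import Mathlib
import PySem

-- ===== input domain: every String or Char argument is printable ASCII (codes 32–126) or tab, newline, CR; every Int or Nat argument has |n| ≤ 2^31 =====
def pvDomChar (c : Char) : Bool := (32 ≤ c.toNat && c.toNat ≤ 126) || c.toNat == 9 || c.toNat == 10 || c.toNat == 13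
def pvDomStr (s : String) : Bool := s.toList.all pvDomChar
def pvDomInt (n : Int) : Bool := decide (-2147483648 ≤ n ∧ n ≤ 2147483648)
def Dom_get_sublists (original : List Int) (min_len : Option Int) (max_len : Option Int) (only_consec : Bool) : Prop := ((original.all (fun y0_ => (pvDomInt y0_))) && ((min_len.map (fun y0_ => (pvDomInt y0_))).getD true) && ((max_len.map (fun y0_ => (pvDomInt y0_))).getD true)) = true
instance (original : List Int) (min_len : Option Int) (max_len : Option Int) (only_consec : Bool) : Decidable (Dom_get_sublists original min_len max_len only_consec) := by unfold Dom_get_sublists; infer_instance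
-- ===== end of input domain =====

-- B generates the length-window subsequences once with a pruned recursive enumerator and
-- slices them per length, and builds the consecutive branch as one flat comprehension
-- (objective: alternative decomposition, no speed claim).

-- ===== PORT A =====
-- model of itertools.combinations(xs, l) (lexicographic-by-index order); the l < 0 case
-- (where Python raises ValueError) is excluded by Pre_get_sublists
def combsA (l : Int) : List Int → List (List Int)
  | [] => if l = 0 then [[]] else []
  | x :: rest =>
      if l < 0 then []
      else if l = 0 then [[]]
      else (combsA (l - 1) rest).map (fun t => x :: t) ++ combsA l rest

def get_sublists (original : List Int) (min_len : Option Int) (max_len : Option Int) (only_consec : Bool) : List (List Int) :=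
  let minL := min_len.getD 1
  let maxL := max_len.getD ((original.length : Int) - 1)
  if !only_consec then
    (PySem.List.pyRange minL (maxL + 1) 1).foldl (fun sublists l => sublists ++ combsA l original) []
  else
    (PySem.List.pyRange minL (maxL + 1) 1).foldl (fun sublists l =>
      let skip : Int := (original.length : Int) - l
      (PySem.List.pyRange 0 (original.length : Int) 1).foldl (fun sub2 i =>
        if i + skip ≤ (original.length : Int) then
          sub2 ++ [PySem.List.slice original (some 0) (some i) ++ PySem.List.slice original (some (i + skip)) none]
        else sub2) sublists) []

-- ===== PORT B =====
-- _subs xs lo hi: all subsequences of xs with lo ≤ length ≤ hi, index-lexicographic order,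
-- pruning branches that cannot reach lo or would exceed hi
def subsLH : List Int → Int → Int → List (List Int)
  | xs, lo, hi =>
    if lo > (xs.length : Int) ∨ hi < 0 ∨ hi < lo then []
    else match xs with
      | [] => if lo ≤ 0 then [[]] else []
      | x :: rest =>
        if hi = 0 then (if lo ≤ 0 then [[]] else [])
        else (subsLH rest (lo - 1) (hi - 1)).map (fun t => x :: t) ++ subsLH rest lo hi

def get_sublists_alt (original : List Int) (min_len : Option Int) (max_len : Option Int) (only_consec : Bool) : List (List Int) :=
  let minL := min_len.getD 1
  let maxL := max_len.getD ((original.length : Int) - 1)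
  if only_consec then
    let n : Int := (original.length : Int)
    (PySem.List.pyRange minL (maxL + 1) 1).flatMap (fun l =>
      (PySem.List.pyRange 0 (min n (l + 1)) 1).map (fun i =>
        PySem.List.slice original none (some i) ++ PySem.List.slice original (some (i + n - l)) none))
  else
    let pool := subsLH original minL maxL
    (PySem.List.pyRange minL (maxL + 1) 1).flatMap (fun l =>
      pool.filter (fun t => decide ((t.length : Int) = l)))

-- ===== PRECONDITION & SPEC =====
-- Pre_ excludes exactly the inputs where A raises ValueError: the non-consecutive branch
-- with a non-empty length range starting at a negative length (combinations(xs, l) with l < 0).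
def Pre_get_sublists (original : List Int) (min_len : Option Int) (max_len : Option Int) (only_consec : Bool) : Prop :=
  only_consec = true ∨ 0 ≤ min_len.getD 1 ∨ max_len.getD ((original.length : Int) - 1) + 1 ≤ min_len.getD 1
instance (original : List Int) (min_len : Option Int) (max_len : Option Int) (only_consec : Bool) : Decidable (Pre_get_sublists original min_len max_len only_consec) := by unfold Pre_get_sublists; infer_instance

def pvWitness_get_sublists : List Int × Option Int × Option Int × Bool := ([1, 2, 3], none, none, false)

def Spec_get_sublists (original : List Int) (min_len : Option Int) (max_len : Option Int) (only_consec : Bool) (out : List (List Int)) : Prop := out = get_sublists_alt original min_len max_len only_consec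
instance (original : List Int) (min_len : Option Int) (max_len : Option Int) (only_consec : Bool) (out : List (List Int)) : Decidable (Spec_get_sublists original min_len max_len only_consec out) := by unfold Spec_get_sublists; infer_instance

-- ===== CLAIM =====
def Claim_equal_get_sublists : Prop := ∀ (original : List Int) (min_len : Option Int) (max_len : Option Int) (only_consec : Bool), Dom_get_sublists original min_len max_len only_consec → Pre_get_sublists original min_len max_len only_consec → Spec_get_sublists original min_len max_len only_consec (get_sublists original min_len max_len only_consec)

-- ===== LEMMAS AND PROOFS =====

lemma combsA_zero (xs : List Int) : combsA 0 xs = [[]] := by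
  cases xs <;> simp [combsA]

lemma combsA_gt (xs : List Int) (l : Int) (h : (xs.length : Int) < l) : combsA l xs = [] := by
  induction xs generalizing l with
  | nil => simp at h; simp [combsA, show l ≠ 0 by omega]
  | cons x rest ih =>
    simp only [List.length_cons] at h
    rw [combsA, if_neg (by omega), if_neg (by omega),
      ih (l - 1) (by push_cast at h ⊢; omega), ih l (by omega)]
    simp

-- filtering the pruned window enumeration at a length inside the window recovers combinations
lemma filter_subsLH (xs : List Int) (lo hi l : Int) (h1 : lo ≤ l) (h2 : l ≤ hi) (h3 : 0 ≤ l) :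
    (subsLH xs lo hi).filter (fun t => decide ((t.length : Int) = l)) = combsA l xs := by
  induction xs generalizing lo hi l with
  | nil =>
    rw [subsLH]
    by_cases hp : lo > ((List.length ([] : List Int) : Int)) ∨ hi < 0 ∨ hi < lo
    · rw [if_pos hp]
      simp only [List.length_nil, Nat.cast_zero] at hp
      have hl : l ≠ 0 := by omega
      simp [combsA, hl]
    · rw [if_neg hp]
      simp only [List.length_nil, Nat.cast_zero] at hp
      rw [if_pos (by omega)]
      by_cases hl : l = 0 <;> simp [combsA, hl] <;> omega
  | cons x rest ih =>
    rw [subsLH]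
    by_cases hp : lo > ((rest.length : Int) + 1) ∨ hi < 0 ∨ hi < lo
    · rw [if_pos (by push_cast; exact hp)]
      have : ((x :: rest).length : Int) < l := by simp; push_cast; omega
      rw [combsA_gt _ _ this]; rfl
    · rw [if_neg (by push_cast; exact hp)]
      by_cases hh : hi = 0
      · have hl0 : l = 0 := by omega
        rw [if_pos hh, if_pos (by omega), hl0, combsA_zero]
        simp
      · rw [if_neg hh, List.filter_append, List.filter_map]
        by_cases hl0 : l = 0
        · subst hl0
          have hmap : ((fun t => decide ((List.length t : Int) = 0)) ∘ (fun t => x :: t))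
              = fun t => false := by
            funext t; simp [Function.comp]; push_cast; omega
          rw [hmap, List.filter_false, List.map_nil, List.nil_append, combsA_zero,
            ih lo hi 0 h1 (by omega) (by omega)]
          exact combsA_zero rest
        · have hmap : ((fun t => decide ((List.length t : Int) = l)) ∘ (fun t => x :: t))
              = fun t => decide ((List.length t : Int) = l - 1) := by
            funext t; simp [Function.comp]; constructor <;> (intro h; push_cast at h ⊢; omega)
          rw [hmap, ih (lo - 1) (hi - 1) (l - 1) (by omega) (by omega) (by omega),
            ih lo hi l h1 (by omega) h3, combsA]
          rw [if_neg (by omega), if_neg hl0]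
 
-- the consecutive-branch inner loops agree: filtering range(0, n) by i + (n - l) ≤ n
-- is the same as iterating range(0, min(n, l + 1))
lemma filter_range_trunc (n l : Int) (hn : 0 ≤ n) (f : Int → List Int) (acc : List (List Int)) :
    (PySem.List.pyRange 0 n 1).foldl (fun a i => if i + (n - l) ≤ n then a ++ [f i] else a) acc
    = acc ++ (PySem.List.pyRange 0 (min n (l + 1)) 1).map f := by
  have hL : (PySem.List.pyRange 0 n 1).foldl (fun a i => if i + (n - l) ≤ n then a ++ [f i] else a) acc
      = acc ++ ((PySem.List.pyRange 0 n 1).filter (fun i => decide (i ≤ l))).map f := by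
    rw [PySem.List.foldl_congr_mem (PySem.List.pyRange 0 n 1) _
      (fun a i => if decide (i ≤ l) = true then a ++ [f i] else a) acc
      (by intro a x _; simp only [decide_eq_true_eq]; exact if_congr (by omega) rfl rfl)]
    exact PySem.List.foldl_append_if _ _ _ _
  rw [hL]
  congr 1
  by_cases hl : l + 1 ≤ 0
  · have h0 : (PySem.List.pyRange 0 n 1).filter (fun i => decide (i ≤ l)) = [] := by
      apply List.filter_eq_nil_iff.mpr
      intro i hi
      have := (PySem.List.mem_pyRange_one).1 hi
      simp only [decide_eq_true_eq]
      omega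
    rw [PySem.List.pyRange_one_eq_nil (show min n (l + 1) ≤ 0 by omega), h0]
  · have hm1 : (0 : Int) ≤ min n (l + 1) := by omega
    have hm2 : min n (l + 1) ≤ n := by omega
    rw [PySem.List.pyRange_one_append 0 (min n (l + 1)) n hm1 hm2, List.filter_append]
    have h1 : (PySem.List.pyRange 0 (min n (l + 1)) 1).filter (fun i => decide (i ≤ l))
        = PySem.List.pyRange 0 (min n (l + 1)) 1 := by
      apply List.filter_eq_self.mpr
      intro i hi
      have := (PySem.List.mem_pyRange_one).1 hi
      simp only [decide_eq_true_eq]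
      omega
    have h2 : (PySem.List.pyRange (min n (l + 1)) n 1).filter (fun i => decide (i ≤ l)) = [] := by
      apply List.filter_eq_nil_iff.mpr
      intro i hi
      have := (PySem.List.mem_pyRange_one).1 hi
      simp only [decide_eq_true_eq]
      omega
    rw [h1, h2, List.append_nil]

-- ===== VERDICT =====
theorem get_sublists_spec : Claim_equal_get_sublists := by
  intro original min_len max_len only_consec _ hpre
  unfold Spec_get_sublists get_sublists get_sublists_alt
  cases only_consec with
  | true =>
    simp only [Bool.not_true, Bool.false_eq_true, if_false, if_true]
    rw [PySem.List.foldl_congr_mem _ _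
      (fun (acc : List (List Int)) l => acc ++ (PySem.List.pyRange 0 (min (original.length : Int) (l + 1)) 1).map
        (fun i => PySem.List.slice original (some 0) (some i)
          ++ PySem.List.slice original (some (i + ((original.length : Int) - l))) none)) []
      (by
        intro acc l _
        exact filter_range_trunc (original.length : Int) l (Int.natCast_nonneg _) _ acc)]
    rw [PySem.List.foldl_append_eq_flatMap, List.nil_append]
    apply List.flatMap_congr
    intro l _
    apply List.map_congr_left
    intro i _
    rw [PySem.List.slice_zero_start,
      show i + ((original.length : Int) - l) = i + (original.length : Int) - l from by ring]
  | false =>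
    simp only [Bool.not_false, if_true, Bool.false_eq_true, if_false]
    rw [PySem.List.foldl_append_eq_flatMap, List.nil_append]
    rcases hpre with h | h | h
    · exact absurd h (by simp)
    · apply List.flatMap_congr
      intro l hl
      have hm := (PySem.List.mem_pyRange_one).1 hl
      exact (filter_subsLH original _ _ l (by omega) (by omega) (by omega)).symm
    · rw [PySem.List.pyRange_one_eq_nil (by omega)]
      simp
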